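-- pv_equiv track=rewrite | github.com/P4X-ng/data | full_apps/pfs-infinity/app/tools/vpcpu/data_catalog.py | detect_vendor
-- ===== SOURCE A (Python) =====
-- from typing import Optional, Dict, Any, List
--
-- def detect_vendor(headers: Dict[str, str]) -> Optional[str]:
--     h = {k.lower(): v for k, v in headers.items()}
--     if 'cf-cache-status' in h:
--         return 'Cloudflare'
--     if 'x-cache' in h and 'cloudfront' in h.get('x-cache', '').lower():
--         return 'CloudFront'
--     if 'x-served-by' in h and 'fastly' in h.get('x-served-by', '').lower():
--         return 'Fastly'
--     if 'server' in h and 'akamai' in h.get('server', '').lower():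
--         return 'Akamai'
--     if 'via' in h and 'varnish' in h.get('via', '').lower():
--         return 'Varnish/Fastly?'
--     return None
-- ===== SOURCE B (Python) =====
-- from typing import Optional, Dict
--
-- _PRIORITY = ('Cloudflare', 'CloudFront', 'Fastly', 'Akamai', 'Varnish/Fastly?')
--
-- def _signals(key, value):
--     """All vendor signals carried by one header line (key already lowercased)."""
--     vl = value.lower()
--     out = []
--     if key == 'cf-cache-status':
--         out.append('Cloudflare')
--     if key == 'x-cache' and 'cloudfront' in vl:
--         out.append('CloudFront')
--     if key == 'x-served-by' and 'fastly' in vl: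
--         out.append('Fastly')
--     if key == 'server' and 'akamai' in vl:
--         out.append('Akamai')
--     if key == 'via' and 'varnish' in vl:
--         out.append('Varnish/Fastly?')
--     return out
--
-- def detect_vendor(headers: Dict[str, str]) -> Optional[str]:
--     # One reverse pass over the headers (so the last duplicate of a lowercased
--     # key wins, as in a dict build), collecting the set of ALL vendors
--     # signalled; then pick the highest-priority vendor found.
--     seen = set()
--     found = set()
--     for k, v in reversed(list(headers.items())):
--         kl = k.lower()
--         if kl in seen:
--             continue
--         seen.add(kl)
--         found.update(_signals(kl, v))
--     for vendor in _PRIORITY: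
--         if vendor in found:
--             return vendor
--     return None
-- ===== Notes on version B (the rewrite author's own statement) =====
-- stated objective: alternative
-- what changed: Instead of A's dict build followed by an ordered if/return chain, B makes one reverse pass over the raw header list (last duplicate lowercased key wins), collecting the SET of all vendors signalled, and then selects the highest-priority vendor from that set.
import Mathlib
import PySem

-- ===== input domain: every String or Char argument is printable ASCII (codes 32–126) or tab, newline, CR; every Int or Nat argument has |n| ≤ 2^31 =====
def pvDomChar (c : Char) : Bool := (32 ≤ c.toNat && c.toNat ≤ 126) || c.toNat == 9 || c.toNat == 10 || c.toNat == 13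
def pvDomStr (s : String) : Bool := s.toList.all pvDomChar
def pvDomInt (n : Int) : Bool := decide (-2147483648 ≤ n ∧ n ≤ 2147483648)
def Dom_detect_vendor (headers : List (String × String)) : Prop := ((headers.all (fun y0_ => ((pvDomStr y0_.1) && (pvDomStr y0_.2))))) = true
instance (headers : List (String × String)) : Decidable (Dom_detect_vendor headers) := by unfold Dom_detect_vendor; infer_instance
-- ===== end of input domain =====

-- B replaces A's dict-then-if-chain with one reverse pass collecting the set of all signalled vendors, then a priority pick (alternative decomposition; same cost).

-- ===== PORT A =====
def detect_vendor (headers : List (String × String)) : Option String :=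
  let h : PySem.Dict String String :=
    headers.foldl (fun d kv => d.insert (PySem.Str.lower kv.1) kv.2) PySem.Dict.empty
  if h.contains "cf-cache-status" then some "Cloudflare"
  else if h.contains "x-cache" && PySem.Str.isIn "cloudfront" (PySem.Str.lower (h.getD "x-cache" "")) then
    some "CloudFront"
  else if h.contains "x-served-by" && PySem.Str.isIn "fastly" (PySem.Str.lower (h.getD "x-served-by" "")) then
    some "Fastly"
  else if h.contains "server" && PySem.Str.isIn "akamai" (PySem.Str.lower (h.getD "server" "")) then
    some "Akamai"
  else if h.contains "via" && PySem.Str.isIn "varnish" (PySem.Str.lower (h.getD "via" "")) then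
    some "Varnish/Fastly?"
  else none

-- ===== PORT B =====
def vendorSignals (key v : String) : List String :=
  let vl := PySem.Str.lower v
  (if key == "cf-cache-status" then ["Cloudflare"] else []) ++
  (if key == "x-cache" && PySem.Str.isIn "cloudfront" vl then ["CloudFront"] else []) ++
  (if key == "x-served-by" && PySem.Str.isIn "fastly" vl then ["Fastly"] else []) ++
  (if key == "server" && PySem.Str.isIn "akamai" vl then ["Akamai"] else []) ++
  (if key == "via" && PySem.Str.isIn "varnish" vl then ["Varnish/Fastly?"] else [])

def collectSignals : List (String × String) → PySem.Set String → PySem.Set String → PySem.Set String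
  | [], _, found => found
  | (k, v) :: rest, seen, found =>
    let kl := PySem.Str.lower k
    if seen.contains kl then collectSignals rest seen found
    else collectSignals rest (seen.add kl) (PySem.Set.update found (vendorSignals kl v))

def pickByPriority (found : PySem.Set String) : List String → Option String
  | [] => none
  | p :: rest => if found.contains p then some p else pickByPriority found rest

def detect_vendor_alt (headers : List (String × String)) : Option String :=
  pickByPriority (collectSignals headers.reverse PySem.Set.empty PySem.Set.empty)
    ["Cloudflare", "CloudFront", "Fastly", "Akamai", "Varnish/Fastly?"]

-- ===== PRECONDITION & SPEC =====
def Spec_detect_vendor (headers : List (String × String)) (out : Option String) : Prop := out = detect_vendor_alt headers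
instance (headers : List (String × String)) (out : Option String) : Decidable (Spec_detect_vendor headers out) := by unfold Spec_detect_vendor; infer_instance

-- ===== CLAIM (what is proved, stated in full; the proofs are below) =====
def Claim_equal_detect_vendor : Prop := ∀ (headers : List (String × String)), Dom_detect_vendor headers → Spec_detect_vendor headers (detect_vendor headers)

-- ===== LEMMAS AND PROOFS =====

-- value of the LAST occurrence of lowercased key k in headers = FIRST match in the reversed list l
def revVal (l : List (String × String)) (k : String) : Option String :=
  (l.find? (fun kv => PySem.Str.lower kv.1 == k)).map (·.2)

theorem set_contains_add (s : PySem.Set String) (x w : String) :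
    (PySem.Set.add s x).contains w = (s.contains w || w == x) := by
  by_cases hx : x ∈ s <;> by_cases hw : w = x
  · subst hw; simp [PySem.Set.add, hx]
  · simp [PySem.Set.add, hx, hw]
  · subst hw; simp [PySem.Set.add, hx]
  · simp [PySem.Set.add, hx, hw]

theorem set_contains_update (l : List String) (s : PySem.Set String) (w : String) :
    (PySem.Set.update s l).contains w = (s.contains w || l.contains w) := by
  induction l generalizing s with
  | nil => simp [PySem.Set.update]
  | cons x xs ih =>
    show ((PySem.Set.add s x).update xs).contains w = _
    rw [ih, set_contains_add]
    by_cases hwx : w = x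
    · subst hwx; simp
    · have hb : (w == x) = false := by simp [hwx]
      simp [hwx, hb]

theorem collect_contains (w key : String) (cond : String → Bool)
    (hsig : ∀ kl v, (vendorSignals kl v).contains w = (kl == key && cond v)) :
    ∀ (l : List (String × String)) (seen found : PySem.Set String),
      (collectSignals l seen found).contains w =
        (found.contains w || (!seen.contains key && (revVal l key).elim false cond)) := by
  intro l
  induction l with
  | nil => intro seen found; simp [collectSignals, revVal]
  | cons kv rest ih =>
    intro seen found
    obtain ⟨k0, v⟩ := kv
    by_cases hseen : PySem.Str.lower k0 ∈ seen
    · rw [show collectSignals ((k0, v) :: rest) seen found = collectSignals rest seen found by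
        simp [collectSignals, hseen], ih]
      by_cases hk : PySem.Str.lower k0 = key
      · subst hk; simp [revVal, hseen]
      · have h1 : (PySem.Str.lower k0 == key) = false := by simp [hk]
        simp [revVal, h1]
    · rw [show collectSignals ((k0, v) :: rest) seen found
          = collectSignals rest (seen.add (PySem.Str.lower k0))
              (PySem.Set.update found (vendorSignals (PySem.Str.lower k0) v)) by
        simp [collectSignals, hseen], ih]
      rw [set_contains_update, hsig, set_contains_add]
      by_cases hk : PySem.Str.lower k0 = key
      · subst hk
        simp [revVal, hseen]
      · have h1 : (PySem.Str.lower k0 == key) = false := by simp [hk]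
        have h2 : (key == PySem.Str.lower k0) = false := by simp [Ne.symm hk]
        simp [revVal, h1, h2]

theorem get?_build (l : List (String × String)) (d : PySem.Dict String String) (k : String) :
    (l.foldl (fun d kv => d.insert (PySem.Str.lower kv.1) kv.2) d).get? k
      = (revVal l.reverse k).or (d.get? k) := by
  induction l generalizing d with
  | nil => simp [revVal]
  | cons kv rest ih =>
    obtain ⟨k0, v⟩ := kv
    rw [List.foldl_cons, ih]
    rcases hf : rest.reverse.find? (fun kv => PySem.Str.lower kv.1 == k) with _ | p
    · by_cases hk : PySem.Str.lower k0 = k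
      · subst hk
        simp [revVal, List.find?_append, hf, PySem.Dict.get?_insert_self]
      · have h1 : (PySem.Str.lower k0 == k) = false := by simp [hk]
        simp [revVal, List.find?_append, hf, h1, PySem.Dict.get?_insert_of_ne _ _ (Ne.symm hk)]
    · simp [revVal, List.find?_append, hf]

theorem sig_cf (kl v : String) :
    (vendorSignals kl v).contains "Cloudflare" = (kl == "cf-cache-status" && (fun (_ : String) => true) v) := by
  simp only [vendorSignals]
  split_ifs <;> simp_all

theorem sig_cloudfront (kl v : String) :
    (vendorSignals kl v).contains "CloudFront"
      = (kl == "x-cache" && PySem.Str.isIn "cloudfront" (PySem.Str.lower v)) := by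
  simp only [vendorSignals]
  split_ifs <;> simp_all

theorem sig_fastly (kl v : String) :
    (vendorSignals kl v).contains "Fastly"
      = (kl == "x-served-by" && PySem.Str.isIn "fastly" (PySem.Str.lower v)) := by
  simp only [vendorSignals]
  split_ifs <;> simp_all

theorem sig_akamai (kl v : String) :
    (vendorSignals kl v).contains "Akamai"
      = (kl == "server" && PySem.Str.isIn "akamai" (PySem.Str.lower v)) := by
  simp only [vendorSignals]
  split_ifs <;> simp_all

theorem sig_varnish (kl v : String) :
    (vendorSignals kl v).contains "Varnish/Fastly?"
      = (kl == "via" && PySem.Str.isIn "varnish" (PySem.Str.lower v)) := by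
  simp only [vendorSignals]
  split_ifs <;> simp_all

-- ===== VERDICT (by name: the statement is the Claim_ definition above) =====
theorem detect_vendor_spec : Claim_equal_detect_vendor := by
  intro headers _
  unfold Spec_detect_vendor detect_vendor detect_vendor_alt
  simp only [pickByPriority]
  rw [collect_contains "Cloudflare" "cf-cache-status" (fun _ => true) sig_cf,
      collect_contains "CloudFront" "x-cache" (fun v => PySem.Str.isIn "cloudfront" (PySem.Str.lower v)) sig_cloudfront,
      collect_contains "Fastly" "x-served-by" (fun v => PySem.Str.isIn "fastly" (PySem.Str.lower v)) sig_fastly,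
      collect_contains "Akamai" "server" (fun v => PySem.Str.isIn "akamai" (PySem.Str.lower v)) sig_akamai,
      collect_contains "Varnish/Fastly?" "via" (fun v => PySem.Str.isIn "varnish" (PySem.Str.lower v)) sig_varnish]
  simp only [PySem.Dict.contains_eq_isSome_get?, PySem.Dict.getD_eq_get?_getD, get?_build,
    PySem.Dict.get?_empty, Option.or_none]
  rcases h1 : revVal headers.reverse "cf-cache-status" with _ | v1 <;>
  rcases h2 : revVal headers.reverse "x-cache" with _ | v2 <;>
  rcases h3 : revVal headers.reverse "x-served-by" with _ | v3 <;>
  rcases h4 : revVal headers.reverse "server" with _ | v4 <;>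
  rcases h5 : revVal headers.reverse "via" with _ | v5 <;>
  simp [PySem.Set.empty]
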